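-- pv_equiv track=rewrite | github.com/KORINZ/atcoder | アルゴリズム実技検定 過去問/第七回 アルゴリズム実技検定 過去問/D - 書き換え.py | replace_strings
-- ===== SOURCE A (Python) =====
-- def replace_strings(s: str) -> str:
--     result = ""
--     match_sets = {"axa", "ixi", "uxu", "exe", "oxo"}
--
--     i = 0
--     while i < len(s):
--         if s[i:i + 3] in match_sets:
--             result += "..."
--             i += 3
--         else:
--             result += s[i]
--             i += 1
--
--     return result
-- ===== SOURCE B (Python) =====
-- import re
--
-- def replace_strings(s: str) -> str:
--     return re.sub(r'([aeiou])x\1', '...', s)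
-- ===== Notes on version B (the rewrite author's own statement) =====
-- stated objective: idiomatic
-- what changed: Replaced the manual index loop with slicing, a match-set and quadratic string concatenation by a single re.sub with a backreference pattern ([aeiou])x\1, whose leftmost non-overlapping substitution reproduces the greedy scan.
import Mathlib
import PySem

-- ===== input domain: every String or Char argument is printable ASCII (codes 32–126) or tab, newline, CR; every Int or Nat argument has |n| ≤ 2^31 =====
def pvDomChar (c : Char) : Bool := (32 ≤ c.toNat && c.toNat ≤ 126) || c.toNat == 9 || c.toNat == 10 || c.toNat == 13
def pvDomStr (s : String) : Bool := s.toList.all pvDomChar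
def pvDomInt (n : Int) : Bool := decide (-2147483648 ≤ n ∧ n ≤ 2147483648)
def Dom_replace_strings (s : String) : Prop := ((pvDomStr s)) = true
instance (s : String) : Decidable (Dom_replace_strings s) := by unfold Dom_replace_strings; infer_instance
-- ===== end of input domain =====

-- B replaces A's manual index loop (slice + match-set) by Python's re.sub with a
-- backreference pattern ([aeiou])x\1 — more idiomatic, same O(n) cost.

-- ===== PORT A =====
-- the set {"axa","ixi","uxu","exe","oxo"} as char lists (Python set of string literals)
def pvMatchSets : List (List Char) :=
  ["axa".toList, "ixi".toList, "uxu".toList, "exe".toList, "oxo".toList]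

-- the while loop: i indexes into s, result accumulates; s[i:i+3] is a slice, s[i] an index
def pvLoopA (cs : List Char) (i : Nat) (result : List Char) : List Char :=
  if _h : i < cs.length then
    if PySem.List.slice cs (some (i : Int)) (some ((i + 3 : Nat) : Int)) ∈ pvMatchSets then
      pvLoopA cs (i + 3) (result ++ "...".toList)
    else
      pvLoopA cs (i + 1) (result ++ [cs.getD i ' '])
  else result
termination_by cs.length - i
decreasing_by all_goals omega

def replace_strings (s : String) : String :=
  String.ofList (pvLoopA s.toList 0 [])

-- ===== PORT B =====
-- hand port of re.sub(r'([aeiou])x\1', '...', s): leftmost non-overlapping scan for this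
-- FIXED pattern (vowel, 'x', the same vowel); exact for this regex — on a match the scan
-- resumes after the replaced triple, otherwise it emits one char and moves on.
def pvReSubVxV : List Char → List Char
  | c1 :: c2 :: c3 :: rest =>
    if c2 = 'x' ∧ c3 = c1 ∧ c1 ∈ ['a', 'e', 'i', 'o', 'u'] then
      '.' :: '.' :: '.' :: pvReSubVxV rest
    else
      c1 :: pvReSubVxV (c2 :: c3 :: rest)
  | cs => cs
termination_by cs => cs.length
decreasing_by all_goals simp <;> omega

def replace_strings_alt (s : String) : String :=
  String.ofList (pvReSubVxV s.toList)

-- ===== PRECONDITION & SPEC =====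
def Spec_replace_strings (s : String) (out : String) : Prop := out = replace_strings_alt s
instance (s : String) (out : String) : Decidable (Spec_replace_strings s out) := by unfold Spec_replace_strings; infer_instance

-- ===== CLAIM (what is proved, stated in full; the proofs are below) =====
def Claim_equal_replace_strings : Prop := ∀ (s : String), Dom_replace_strings s → Spec_replace_strings s (replace_strings s)

-- ===== LEMMAS AND PROOFS =====

-- membership of a 3-char slice in the match set ↔ B's guard
lemma mem_pvMatchSets_iff (c1 c2 c3 : Char) :
    [c1, c2, c3] ∈ pvMatchSets ↔ (c2 = 'x' ∧ c3 = c1 ∧ c1 ∈ ['a', 'e', 'i', 'o', 'u']) := by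
  rw [show pvMatchSets = [['a','x','a'],['i','x','i'],['u','x','u'],['e','x','e'],['o','x','o']]
      from by decide]
  simp only [List.mem_cons, List.not_mem_nil, or_false, List.cons.injEq, and_true]
  constructor
  · rintro (⟨h1,h2,h3⟩|⟨h1,h2,h3⟩|⟨h1,h2,h3⟩|⟨h1,h2,h3⟩|⟨h1,h2,h3⟩) <;> subst_vars <;> simp
  · rintro ⟨h2, h3, h1⟩
    subst h2; subst h3
    rcases h1 with h1|h1|h1|h1|h1 <;> simp_all

-- B's scan emits the head unchanged whenever the guard does not fire
lemma pvReSubVxV_cons_of_not (c : Char) (tl : List Char)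
    (h : ∀ c2 c3 rest, tl = c2 :: c3 :: rest → ¬ (c2 = 'x' ∧ c3 = c ∧ c ∈ ['a', 'e', 'i', 'o', 'u'])) :
    pvReSubVxV (c :: tl) = c :: pvReSubVxV tl := by
  match tl with
  | [] => simp [pvReSubVxV]
  | [c2] => simp [pvReSubVxV]
  | c2 :: c3 :: rest =>
    rw [pvReSubVxV]
    rw [if_neg (h c2 c3 rest rfl)]

-- main loop invariant: A's loop from index i computes result ++ B's scan of the suffix
lemma pvLoopA_eq (cs : List Char) : ∀ i result,
    pvLoopA cs i result = result ++ pvReSubVxV (cs.drop i) := by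
  intro i
  induction hn : cs.length - i using Nat.strong_induction_on generalizing i with
  | _ n ih =>
    intro result
    rw [pvLoopA]
    split
    · rename_i hi
      have hslice : PySem.List.slice cs (some (i : Int)) (some ((i + 3 : Nat) : Int))
          = (cs.drop i).take 3 := by
        rw [PySem.List.slice_natCast]
        congr 1
        omega
      have hne : cs.drop i ≠ [] := by
        intro h
        have := List.drop_eq_nil_iff.mp h
        omega
      obtain ⟨c1, tl, hd⟩ := List.exists_cons_of_ne_nil hne
      have h0 : cs[i]? = some c1 := by
        have h : (cs.drop i)[0]? = cs[i+0]? := List.getElem?_drop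
        rw [hd] at h
        simpa using h.symm
      have hgetD : cs.getD i ' ' = c1 := by
        simp [List.getD, h0]
      have htl : cs.drop (i + 1) = tl := by
        have h1 : cs.drop (i + 1) = (cs.drop i).drop 1 := by
          rw [List.drop_drop]
        rw [h1, hd]; rfl
      split
      · rename_i hmem
        rw [hslice, hd] at hmem
        rcases htl3 : tl with _ | ⟨c2, _ | ⟨c3, rest⟩⟩ <;> subst htl3
        · exact absurd hmem (by simp [pvMatchSets])
        · exact absurd hmem (by simp [pvMatchSets])
        · simp only [List.take] at hmem
          have hguard := (mem_pvMatchSets_iff c1 c2 c3).mp hmem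
          have hd3 : cs.drop (i + 3) = rest := by
            have h3 : cs.drop (i + 3) = (cs.drop i).drop 3 := by
              rw [List.drop_drop]
            rw [h3, hd]; rfl
          have h2 : cs.length - i = rest.length + 3 := by
            have hl := congrArg List.length hd
            simp at hl
            omega
          have hlen : cs.length - (i + 3) < n := by omega
          rw [ih _ hlen (i + 3) rfl, hd3, hd, pvReSubVxV, if_pos hguard]
          have hdots : "...".toList = ['.', '.', '.'] := by decide
          rw [hdots]
          simp
      · rename_i hmem
        rw [hslice, hd] at hmem
        have hstep : pvReSubVxV (c1 :: tl) = c1 :: pvReSubVxV tl := by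
          apply pvReSubVxV_cons_of_not
          intro c2 c3 rest hrest hg
          apply hmem
          rw [hrest]
          simp only [List.take]
          exact (mem_pvMatchSets_iff c1 c2 c3).mpr hg
        have hlen : cs.length - (i + 1) < n := by omega
        rw [ih _ hlen (i + 1) rfl, htl, hd, hstep, hgetD]
        simp
    · rename_i hi
      have hnil : cs.drop i = [] := List.drop_eq_nil_iff.mpr (by omega)
      rw [hnil]
      simp [pvReSubVxV]

-- ===== VERDICT (by name: the statement is the Claim_ definition above) =====
theorem replace_strings_spec : Claim_equal_replace_strings := by
  intro s _
  unfold Spec_replace_strings replace_strings replace_strings_alt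
  rw [pvLoopA_eq s.toList 0]
  simp
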